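-- pv_equiv track=rewrite | github.com/emnh/collatz-2025-01-08 | entanglement.py | simulate_collatz_on_right
-- ===== SOURCE A (Python) =====
-- def simulate_collatz_on_right(R, rbits, buffer_bits, max_iterations=1000):
--     """
--     Simulate Collatz iterations on the integer R (the "right part")
--     while ensuring that the result does not require more than
--     (rbits + buffer_bits) bits. The simulation stops if the value
--     would overflow into the buffer or if max_iterations is reached.
--
--     Parameters:
--       R             : initial right-part value (assumed < 2^rbits)
--       rbits         : nominal bit-length of the right part
--       buffer_bits   : extra bits reserved as a buffer
--       max_iterations: maximum number of iterations to simulate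
--
--     Returns:
--       iterations    : the number of safe Collatz iterations performed.
--     """
--     limit = 2 ** (rbits + buffer_bits)
--     iterations = 0
--
--     while iterations < max_iterations:
--         # If R is even, safe division by 2.
--         if R % 2 == 0:
--             R //= 2
--         else:
--             # For odd numbers, compute 3n + 1 and check if it's within the safe limit.
--             R_next = 3 * R + 1
--             if R_next >= limit:
--                 break  # Operation would overflow the reserved space.
--             R = R_next
--         iterations += 1
--
--     return iterations
-- ===== SOURCE B (Python) =====
-- def simulate_collatz_on_right(R, rbits, buffer_bits, max_iterations=1000):
--     """Countdown re-implementation: keeps a remaining-budget counter and applies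
--     whole runs of halvings in one shift (trailing-zero count of R), with an
--     immediate budget-exhausting exit for R == 0; returns budget used."""
--     limit = 2 ** (rbits + buffer_bits)
--     rem = max_iterations
--     while rem > 0:
--         if R == 0:
--             rem = 0            # 0 halves to 0 forever: all remaining steps are safe
--         elif R & 1:
--             R = 3 * R + 1
--             if R >= limit:
--                 break          # odd step would overflow the reserved space
--             rem -= 1
--         else:
--             t = (R & -R).bit_length() - 1   # trailing zero bits of R
--             s = t if t < rem else rem
--             R >>= s
--             rem -= s
--     return max_iterations - rem
-- ===== Notes on version B (the rewrite author's own statement) =====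
-- stated objective: alternative
-- what changed: B replaces A's count-up one-halving-per-pass loop by a countdown over the remaining budget that applies each whole run of halvings in a single shift (trailing-zero count of R, clamped to the budget), exits in O(1) when R == 0 by zeroing the budget, and restructures the odd step as assign-then-check; the answer is recovered as max_iterations minus the leftover budget.
import Mathlib
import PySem

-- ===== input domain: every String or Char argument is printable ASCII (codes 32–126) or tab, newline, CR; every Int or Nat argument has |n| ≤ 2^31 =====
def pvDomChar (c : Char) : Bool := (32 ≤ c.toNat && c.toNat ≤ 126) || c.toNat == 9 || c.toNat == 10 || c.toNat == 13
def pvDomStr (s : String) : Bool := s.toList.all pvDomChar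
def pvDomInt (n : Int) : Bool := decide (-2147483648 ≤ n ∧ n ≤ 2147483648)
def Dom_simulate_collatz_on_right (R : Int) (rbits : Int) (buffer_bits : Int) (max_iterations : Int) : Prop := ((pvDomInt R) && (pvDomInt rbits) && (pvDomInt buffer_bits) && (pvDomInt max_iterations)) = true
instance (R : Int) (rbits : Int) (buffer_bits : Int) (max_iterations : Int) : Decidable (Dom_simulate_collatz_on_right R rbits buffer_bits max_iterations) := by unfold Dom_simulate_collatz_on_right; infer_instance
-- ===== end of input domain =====

-- B replaces A's count-up one-halving-per-pass loop by a countdown over the remaining budget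
-- that applies each run of halvings in a single shift; return values proved equal on all inputs.

-- ===== PORT A =====

-- Exact port of the Python comparison `R_next >= 2 ** (rbits + buffer_bits)` with e = rbits + buffer_bits:
-- for e ≥ 0 both sides are ints; for e < 0 Python's `2 ** e` is the float 2.0 ** e, which is
-- positive (and < 1) exactly when e ≥ -1074 and equal to 0.0 when e ≤ -1075, so for an integer
-- R_next the comparison is `1 ≤ R_next` resp. `0 ≤ R_next` (checked against CPython).
def pvBreakGE (Rn : Int) (e : Int) : Bool :=
  if 0 ≤ e then decide (2 ^ e.toNat ≤ Rn)
  else if -1074 ≤ e then decide (1 ≤ Rn)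
  else decide (0 ≤ Rn)

-- A's while loop; each executed pass increments `it` by exactly 1 or breaks, so fuel
-- max_iterations.toNat makes the port run the loop exactly as long as Python does.
def goA (e : Int) (R : Int) (it : Int) (mi : Int) (fuel : Nat) : Int :=
  match fuel with
  | 0 => it
  | f + 1 =>
    if it < mi then
      if PySem.Int.mod R 2 = 0 then
        goA e (PySem.Int.floordiv R 2) (it + 1) mi f
      else
        if pvBreakGE (3 * R + 1) e then it
        else goA e (3 * R + 1) (it + 1) mi f
    else it

def simulate_collatz_on_right (R : Int) (rbits : Int) (buffer_bits : Int) (max_iterations : Int) : Int :=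
  goA (rbits + buffer_bits) R 0 max_iterations max_iterations.toNat

-- ===== PORT B =====

-- B's port of the same Python comparison `R >= limit` (limit = 2 ** e, a float for e < 0;
-- see the comment on pvBreakGE), written with the negative case first as in Source B's reading.
def pvOverflow (Rn : Int) (e : Int) : Bool :=
  if e < 0 then (if e < -1074 then decide (0 ≤ Rn) else decide (1 ≤ Rn))
  else decide (2 ^ e.toNat ≤ Rn)

-- B's countdown loop (from Source B): `rem` is the remaining budget; every executed pass lowers
-- `rem` by at least 1 (a batch shift lowers it by s ≥ 1, the R = 0 pass zeroes it), so fuel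
-- max_iterations.toNat runs the loop exactly as long as Python does; the loop's exit value
-- is the leftover budget.
def goB (e : Int) (R : Int) (rem : Int) (fuel : Nat) : Int :=
  match fuel with
  | 0 => rem
  | f + 1 =>
    if 0 < rem then
      if R = 0 then goB e R 0 f
      else if PySem.Int.band R 1 = 1 then
        let Rn := 3 * R + 1
        if pvOverflow Rn e then rem
        else goB e Rn (rem - 1) f
      else
        let t : Int := (PySem.Int.bitLength (PySem.Int.band R (-R)) : Int) - 1
        let s : Int := if t < rem then t else rem
        goB e (R >>> s.toNat) (rem - s) f
    else rem

def simulate_collatz_on_right_alt (R : Int) (rbits : Int) (buffer_bits : Int) (max_iterations : Int) : Int :=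
  max_iterations - goB (rbits + buffer_bits) R max_iterations max_iterations.toNat

-- ===== PRECONDITION & SPEC =====
def Spec_simulate_collatz_on_right (R : Int) (rbits : Int) (buffer_bits : Int) (max_iterations : Int) (out : Int) : Prop := out = simulate_collatz_on_right_alt R rbits buffer_bits max_iterations
instance (R : Int) (rbits : Int) (buffer_bits : Int) (max_iterations : Int) (out : Int) : Decidable (Spec_simulate_collatz_on_right R rbits buffer_bits max_iterations out) := by unfold Spec_simulate_collatz_on_right; infer_instance

-- ===== CLAIM (what is proved, stated in full; the proofs are below) =====
def Claim_equal_simulate_collatz_on_right : Prop := ∀ (R : Int) (rbits : Int) (buffer_bits : Int) (max_iterations : Int), Dom_simulate_collatz_on_right R rbits buffer_bits max_iterations → Spec_simulate_collatz_on_right R rbits buffer_bits max_iterations (simulate_collatz_on_right R rbits buffer_bits max_iterations)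

-- ===== LEMMAS AND PROOFS =====

-- The two overflow tests are the same Boolean function.
theorem overflow_eq_break (Rn e : Int) : pvOverflow Rn e = pvBreakGE Rn e := by
  unfold pvOverflow pvBreakGE
  split_ifs <;> first | rfl | omega

-- A's loop returns `it` unchanged once it ≥ mi (or fuel is out).
theorem goA_stop (e R it mi : Int) (f : Nat) (h : mi ≤ it) : goA e R it mi f = it := by
  cases f <;> simp [goA, not_lt.mpr h]

-- B's loop returns `rem` unchanged once rem ≤ 0 (or fuel is out).
theorem goB_stop (e R rem : Int) (f : Nat) (h : rem ≤ 0) : goB e R rem f = rem := by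
  cases f <;> simp [goB, not_lt.mpr h]

-- A on R = 0 halves 0 forever and exhausts the iteration budget, returning mi.
theorem goA_zero (e mi : Int) : ∀ n (f : Nat) (it : Int),
    (mi - it).toNat = n → n ≤ f → it ≤ mi → goA e 0 it mi f = mi := by
  intro n
  induction n with
  | zero =>
    intro f it h _ hle
    have : it = mi := by omega
    subst this
    exact goA_stop _ _ _ _ _ le_rfl
  | succ n ih =>
    intro f it h hf hle
    have hit : it < mi := by omega
    obtain ⟨f', rfl⟩ : ∃ f', f = f' + 1 := ⟨f - 1, by omega⟩
    have hmod : PySem.Int.mod 0 2 = 0 := by decide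
    have hdiv : PySem.Int.floordiv 0 2 = 0 := by decide
    rw [goA, if_pos hit, if_pos hmod, hdiv]
    exact ih f' (it + 1) (by omega) (by omega) (by omega)

-- k halvings of a multiple of 2^k are k safe passes of A's loop.
theorem goA_batch (e mi : Int) : ∀ (k : Nat) (R it : Int) (f : Nat),
    ((2 : Int) ^ k ∣ R) → it + k ≤ mi → k ≤ f →
    goA e R it mi f = goA e (PySem.Int.floordiv R ((2 : Int) ^ k)) (it + k) mi (f - k) := by
  intro k
  induction k with
  | zero =>
    intro R it f _ _ _
    simp [PySem.Int.floordiv, Int.fdiv_one]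
  | succ k ih =>
    intro R it f hdvd hle hf
    obtain ⟨f', rfl⟩ : ∃ f', f = f' + 1 := ⟨f - 1, by omega⟩
    obtain ⟨q, hq⟩ := hdvd
    subst hq
    have hmod : PySem.Int.mod (2 ^ (k + 1) * q) 2 = 0 :=
      (PySem.Int.mod_eq_zero_iff_dvd _ _).mpr ⟨2 ^ k * q, by ring⟩
    have hstep : PySem.Int.floordiv (2 ^ (k + 1) * q) 2 = 2 ^ k * q := by
      show Int.fdiv _ _ = _
      rw [show (2 : Int) ^ (k + 1) * q = 2 * (2 ^ k * q) by ring]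
      exact Int.mul_fdiv_cancel_left _ (by norm_num)
    have hit : it < mi := by omega
    rw [goA, if_pos hit, if_pos hmod, hstep,
        ih (2 ^ k * q) (it + 1) f' ⟨q, rfl⟩ (by omega) (by omega)]
    have h1 : PySem.Int.floordiv (2 ^ k * q) (2 ^ k) = q := by
      show Int.fdiv _ _ = _
      exact Int.mul_fdiv_cancel_left _ (pow_ne_zero _ (by norm_num))
    have h2 : PySem.Int.floordiv (2 ^ (k + 1) * q) (2 ^ (k + 1)) = q := by
      show Int.fdiv _ _ = _
      exact Int.mul_fdiv_cancel_left _ (pow_ne_zero _ (by norm_num))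
    rw [h1, h2, show it + 1 + (k : Int) = it + ((k + 1 : Nat) : Int) by push_cast; ring,
        show f' - k = f' + 1 - (k + 1) by omega]

-- Nat bit facts: the classic `n &&& (n-1)` clears the lowest set bit.
theorem and_odd_even (a b : Nat) : (2 * a + 1) &&& (2 * b) = 2 * (a &&& b) := by
  have h := Nat.bitwise_bit (f := and) rfl true a false b
  simpa [Nat.bit, HAnd.hAnd, AndOp.and, Nat.land, Nat.mul_comm] using h

theorem and_even_odd (a b : Nat) : (2 * a) &&& (2 * b + 1) = 2 * (a &&& b) := by
  have h := Nat.bitwise_bit (f := and) rfl false a true b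
  simpa [Nat.bit, HAnd.hAnd, AndOp.and, Nat.land, Nat.mul_comm] using h

-- For n = 2^v * m with m odd, n - (n &&& (n-1)) = 2^v (the lowest set bit).
theorem lowbit_eq (v : Nat) : ∀ m : Nat, m % 2 = 1 →
    2 ^ v * m - ((2 ^ v * m) &&& (2 ^ v * m - 1)) = 2 ^ v := by
  induction v with
  | zero =>
    intro m hm
    obtain ⟨a, rfl⟩ : ∃ a, m = 2 * a + 1 := ⟨m / 2, by omega⟩
    have h : (2 * a + 1) &&& (2 * a) = 2 * (a &&& a) := and_odd_even a a
    rw [Nat.and_self] at h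
    simp only [pow_zero, one_mul]
    rw [show 2 * a + 1 - 1 = 2 * a by omega, h]
    omega
  | succ v ih =>
    intro m hm
    have hm0 : 0 < m := by omega
    have hpos : 0 < 2 ^ v * m := by positivity
    have hand : (2 ^ (v + 1) * m) &&& (2 ^ (v + 1) * m - 1)
        = 2 * ((2 ^ v * m) &&& (2 ^ v * m - 1)) := by
      rw [show 2 ^ (v + 1) * m = 2 * (2 ^ v * m) by ring,
          show 2 * (2 ^ v * m) - 1 = 2 * (2 ^ v * m - 1) + 1 by omega]
      exact and_even_odd _ _
    have hle : (2 ^ v * m) &&& (2 ^ v * m - 1) ≤ 2 ^ v * m := Nat.and_le_left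
    have hih := ih m hm
    have hp : (2 : Nat) ^ (v + 1) = 2 * 2 ^ v := by ring
    rw [hand, show 2 ^ (v + 1) * m = 2 * (2 ^ v * m) from by ring, hp]
    omega

-- Python's `R & -R` (two's complement) computed by PySem.Int.band, for R ≠ 0.
theorem band_neg_self (R : Int) (hR : R ≠ 0) :
    PySem.Int.band R (-R) = ((R.natAbs - (R.natAbs &&& (R.natAbs - 1)) : Nat) : Int) := by
  rcases lt_or_gt_of_ne hR with hneg | hpos
  · have h1 : ¬ 0 ≤ R := by omega
    have h2 : (0 : Int) ≤ -R := by omega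
    simp only [PySem.Int.band, if_neg h1, if_pos h2]
    rw [show (-R).toNat = R.natAbs by omega, show (-R - 1).toNat = R.natAbs - 1 by omega]
  · have h1 : (0 : Int) ≤ R := by omega
    have h2 : ¬ (0 : Int) ≤ -R := by omega
    simp only [PySem.Int.band, if_pos h1, if_neg h2]
    rw [show R.toNat = R.natAbs by omega, show (- -R - 1).toNat = R.natAbs - 1 by omega]

-- bit_length of 2^v is v + 1.
theorem bitLength_two_pow (v : Nat) : PySem.Int.bitLength (((2 ^ v : Nat) : Int)) = v + 1 := by
  induction v with
  | zero => decide
  | succ v ih =>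
    rw [PySem.Int.bitLength_natCast (by positivity)]
    rw [show (2 : Nat) ^ (v + 1) / 2 = 2 ^ v by omega]
    omega

-- Every positive Nat is 2^v * m with m odd.
theorem exists_odd_factor : ∀ n : Nat, 0 < n → ∃ v m, n = 2 ^ v * m ∧ m % 2 = 1 := by
  intro n
  induction n using Nat.strong_induction_on with
  | _ n ih =>
    intro hn
    by_cases he : n % 2 = 0
    · obtain ⟨v, m, hvm, hm⟩ := ih (n / 2) (by omega) (by omega)
      exact ⟨v + 1, m, by rw [pow_succ, show 2 ^ v * 2 * m = 2 * (2 ^ v * m) from by ring, ← hvm]; omega, hm⟩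
    · exact ⟨0, n, by omega, by omega⟩

-- Main equivalence: A's count-up loop equals mi minus B's countdown loop, whenever both
-- have fuel at least the remaining budget n = (mi - it).toNat.
theorem goA_eq_goB (e mi : Int) : ∀ n, ∀ (R it : Int) (f g : Nat),
    (mi - it).toNat = n → n ≤ f → n ≤ g → goA e R it mi f = mi - goB e R (mi - it) g := by
  intro n
  induction n using Nat.strong_induction_on with
  | _ n ih =>
    intro R it f g hn hf hg
    rcases Nat.eq_zero_or_pos n with rfl | hnpos
    · have h : mi ≤ it := by omega
      rw [goA_stop _ _ _ _ _ h, goB_stop _ _ _ _ (by omega)]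
      omega
    have hit : it < mi := by omega
    have hrem : 0 < mi - it := by omega
    obtain ⟨f₁, rfl⟩ : ∃ f₁, f = f₁ + 1 := ⟨f - 1, by omega⟩
    obtain ⟨g₁, rfl⟩ : ∃ g₁, g = g₁ + 1 := ⟨g - 1, by omega⟩
    by_cases hR0 : R = 0
    · subst hR0
      rw [goB, if_pos hrem, if_pos rfl, goB_stop _ _ _ _ le_rfl]
      rw [goA_zero e mi n (f₁ + 1) it hn hf (by omega)]
      omega
    have hband1 : PySem.Int.band R 1 = PySem.Int.mod R 2 := PySem.Int.band_one R
    by_cases hev : PySem.Int.mod R 2 = 0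
    · -- even batch
      have hdvd2 : (2 : Int) ∣ R := (PySem.Int.mod_eq_zero_iff_dvd _ _).mp hev
      have hnA : 0 < R.natAbs := Int.natAbs_pos.mpr hR0
      obtain ⟨v, m, hvm, hm⟩ := exists_odd_factor R.natAbs hnA
      have hdvdN : (2 : Nat) ∣ R.natAbs := by
        have := Int.natAbs_dvd_natAbs.mpr hdvd2
        simpa using this
      have hv1 : 1 ≤ v := by
        rcases Nat.eq_zero_or_pos v with rfl | h
        · exfalso; rw [pow_zero, one_mul] at hvm; omega
        · exact h
      have hband : PySem.Int.band R (-R) = ((2 ^ v : Nat) : Int) := by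
        rw [band_neg_self R hR0, hvm, lowbit_eq v m hm]
      have hbl : (PySem.Int.bitLength (PySem.Int.band R (-R)) : Int) - 1 = (v : Int) := by
        rw [hband, bitLength_two_pow]; push_cast; ring
      have hnotodd : ¬ PySem.Int.band R 1 = 1 := by rw [hband1, hev]; decide
      rw [goB, if_pos hrem, if_neg hR0, if_neg hnotodd]
      show goA e R it mi (f₁ + 1) = mi -
        goB e (R >>> ((if (PySem.Int.bitLength (PySem.Int.band R (-R)) : Int) - 1 < mi - it
                        then (PySem.Int.bitLength (PySem.Int.band R (-R)) : Int) - 1 else mi - it)).toNat)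
          (mi - it - (if (PySem.Int.bitLength (PySem.Int.band R (-R)) : Int) - 1 < mi - it
                        then (PySem.Int.bitLength (PySem.Int.band R (-R)) : Int) - 1 else mi - it)) g₁
      rw [hbl]
      have hsmin : (if (v : Int) < mi - it then (v : Int) else mi - it) = min (v : Int) (mi - it) := by
        rw [min_def]; split_ifs <;> omega
      rw [hsmin]
      set s : Int := min (v : Int) (mi - it) with hs
      have hs1 : 1 ≤ s := by
        have : (1 : Int) ≤ (v : Int) := by exact_mod_cast hv1
        simp only [hs]; omega
      have hsle : s ≤ mi - it := min_le_right _ _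
      have hsv : s ≤ (v : Int) := min_le_left _ _
      set k : Nat := s.toNat with hk
      have hks : (k : Int) = s := by omega
      have hkv : k ≤ v := by omega
      have hkdvd : (2 : Int) ^ k ∣ R := by
        have h1 : (2 : Nat) ^ k ∣ R.natAbs := hvm ▸ Dvd.dvd.mul_right (pow_dvd_pow 2 hkv) m
        have h2 : ((2 : Int) ^ k).natAbs ∣ R.natAbs := by simpa using h1
        exact Int.natAbs_dvd_natAbs.mp h2
      have hshift : R >>> k = PySem.Int.floordiv R ((2 : Int) ^ k) := by
        rw [Int.shiftRight_eq_div_pow,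
            show PySem.Int.floordiv R ((2:Int)^k) = Int.fdiv R ((2:Int)^k) from rfl,
            Int.fdiv_eq_ediv_of_dvd hkdvd]
        push_cast
        rfl
      rw [hshift, goA_batch e mi k R it (f₁ + 1) hkdvd (by omega) (by omega)]
      have := ih (n - k) (by omega) (PySem.Int.floordiv R ((2:Int)^k)) (it + k)
        (f₁ + 1 - k) g₁ (by omega) (by omega) (by omega)
      rw [this, show mi - (it + (k : Int)) = mi - it - s by omega]
    · -- odd step
      have hodd : PySem.Int.band R 1 = 1 := by
        have h0 := PySem.Int.mod_nonneg R (b := 2) (by norm_num)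
        have h2 := PySem.Int.mod_lt R (b := 2) (by norm_num)
        rw [hband1]; omega
      rw [goA, goB, if_pos hit, if_pos hrem, if_neg hR0, if_pos hodd, if_neg hev]
      simp only [overflow_eq_break]
      by_cases hb : pvBreakGE (3 * R + 1) e = true
      · rw [if_pos hb, if_pos hb]; omega
      · rw [if_neg hb, if_neg hb]
        rw [ih (n - 1) (by omega) (3 * R + 1) (it + 1) f₁ g₁ (by omega) (by omega) (by omega),
            show mi - (it + 1) = mi - it - 1 by omega]

-- ===== VERDICT (by name: the statement is the Claim_ definition above) =====
theorem simulate_collatz_on_right_spec : Claim_equal_simulate_collatz_on_right := by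
  intro R rbits buffer_bits max_iterations _
  show simulate_collatz_on_right R rbits buffer_bits max_iterations
      = simulate_collatz_on_right_alt R rbits buffer_bits max_iterations
  unfold simulate_collatz_on_right simulate_collatz_on_right_alt
  rw [goA_eq_goB (rbits + buffer_bits) max_iterations max_iterations.toNat R 0
    max_iterations.toNat max_iterations.toNat (by omega) le_rfl le_rfl]
  norm_num
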